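-- pv_equiv track=rewrite | github.com/IvanIvanov-prog/GB-new | Python/Seminar/Seminar4/Task2cwseminar4.py | collector
-- ===== SOURCE A (Python) =====
-- def collector (second_list):
--     therd_list = []
--     for i in range(len(second_list)):
--         value = second_list[i]
--         sublist_list = [value]
--         for k in range(i + 1, len(second_list)):
--             if second_list [k] > value:
--                 value = second_list [k]
--                 sublist_list.append (value)
--         if len (sublist_list) > 1:
--             therd_list.append (sublist_list)
--     return therd_list
-- ===== SOURCE B (Python) =====
-- def collector(second_list):
--     # One right-to-left pass: the record chain starting at i is
--     # second_list[i] followed by the part of the chain starting at i+1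
--     # that is strictly greater than second_list[i].
--     out = []
--     cur = []
--     for x in reversed(second_list):
--         tail = cur
--         while tail and tail[0] <= x:
--             tail = tail[1:]
--         cur = [x] + tail
--         if len(cur) > 1:
--             out.append(cur)
--     out.reverse()
--     return out
-- ===== Notes on version B (the rewrite author's own statement) =====
-- stated objective: alternative
-- what changed: Replaced A's nested left-to-right scans (a fresh running-max pass for every start index) by a single right-to-left pass that maintains the record chain of the current suffix, extending it per element with a strict dropWhile.
import Mathlib
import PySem

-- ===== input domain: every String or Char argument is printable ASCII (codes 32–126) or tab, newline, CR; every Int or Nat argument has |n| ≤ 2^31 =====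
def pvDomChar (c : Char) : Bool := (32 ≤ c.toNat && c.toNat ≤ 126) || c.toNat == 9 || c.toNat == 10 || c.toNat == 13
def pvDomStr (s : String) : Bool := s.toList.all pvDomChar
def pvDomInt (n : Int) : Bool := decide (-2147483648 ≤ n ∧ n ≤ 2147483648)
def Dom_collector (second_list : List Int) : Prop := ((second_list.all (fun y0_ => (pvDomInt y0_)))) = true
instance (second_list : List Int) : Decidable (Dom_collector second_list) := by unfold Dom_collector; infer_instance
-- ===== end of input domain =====

-- B replaces A's nested left-to-right running-max scans by a single right-to-left pass
-- that maintains the current suffix's record chain with a strict dropWhile (alternative algorithm).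


-- ===== PORT A =====
-- literal port of A: indices i,k exact via pyRange/pyGetD (all accesses in range);
-- astep/ainner name the two loop bodies of the Python source.
def ainner (st : Int × List Int) (x : Int) : Int × List Int :=
  if x > st.1 then (x, st.2 ++ [x]) else st

def astep (l : List Int) (therd : List (List Int)) (i : Int) : List (List Int) :=
  let r :=
    (PySem.List.pyRange (i + 1) l.length 1).foldl
      (fun st k => ainner st (PySem.List.pyGetD l k 0))
      (PySem.List.pyGetD l i 0, [PySem.List.pyGetD l i 0])
  if r.2.length > 1 then therd ++ [r.2] else therd

def collector (second_list : List Int) : List (List Int) :=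
  (PySem.List.pyRange 0 second_list.length 1).foldl (astep second_list) []

-- ===== PORT B =====
-- literal port of Source B: fold over the reversed list; the while-loop stripping
-- leading elements <= x is List.dropWhile; out.append + final out.reverse.
def bstep (st : List Int × List (List Int)) (x : Int) : List Int × List (List Int) :=
  let cur := x :: st.1.dropWhile (fun t => decide (t ≤ x))
  (cur, if cur.length > 1 then st.2 ++ [cur] else st.2)

def collector_alt (second_list : List Int) : List (List Int) :=
  (second_list.reverse.foldl bstep ([], [])).2.reverse

-- ===== PRECONDITION & SPEC =====
def Spec_collector (second_list : List Int) (out : List (List Int)) : Prop := out = collector_alt second_list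
instance (second_list : List Int) (out : List (List Int)) : Decidable (Spec_collector second_list out) := by unfold Spec_collector; infer_instance

-- ===== CLAIM (what is proved, stated in full; the proofs are below) =====
def Claim_equal_collector : Prop := ∀ (second_list : List Int), Dom_collector second_list → Spec_collector second_list (collector second_list)

-- ===== LEMMAS AND PROOFS =====

-- A's inner loop as structural recursion on the suffix
def fA : Int → List Int → List Int
  | _, [] => []
  | v, y :: ys => if y > v then y :: fA y ys else fA v ys

-- B's record chain of a list
def recs : List Int → List Int
  | [] => []
  | x :: xs => x :: (recs xs).dropWhile (fun t => decide (t ≤ x))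

-- the common value both programs compute
def chains : List Int → List (List Int)
  | [] => []
  | x :: xs => (if (x :: fA x xs).length > 1 then [x :: fA x xs] else []) ++ chains xs

theorem dropWhile_dropWhile_le (x y : Int) (h : y ≤ x) :
    ∀ L : List Int,
      (L.dropWhile (fun t => decide (t ≤ y))).dropWhile (fun t => decide (t ≤ x))
        = L.dropWhile (fun t => decide (t ≤ x)) := by
  intro L
  induction L with
  | nil => simp
  | cons z L ih =>
    by_cases hz : z ≤ y
    · have hzx : z ≤ x := le_trans hz h
      simp [List.dropWhile, hz, hzx, ih]
    · simp [List.dropWhile, hz]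

theorem fA_eq_dropWhile_recs :
    ∀ (xs : List Int) (x : Int),
      fA x xs = (recs xs).dropWhile (fun t => decide (t ≤ x)) := by
  intro xs
  induction xs with
  | nil => intro x; simp [fA, recs]
  | cons y ys ih =>
    intro x
    by_cases hxy : y > x
    · have : ¬ (y ≤ x) := by omega
      simp [fA, recs, hxy, this, ih y]
    · have hle : y ≤ x := by omega
      simp [fA, recs, hxy, hle, ih x,
        dropWhile_dropWhile_le x y hle (recs ys)]

theorem inner_fold_eq (xs : List Int) :
    ∀ (v : Int) (sub : List Int),
      (xs.foldl ainner (v, sub)).2 = sub ++ fA v xs := by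
  induction xs with
  | nil => intro v sub; simp [fA]
  | cons y ys ih =>
    intro v sub
    by_cases h : y > v
    · simp [List.foldl, ainner, fA, h, ih]
    · simp [List.foldl, ainner, fA, h, ih]

theorem bfold_eq (l : List Int) :
    l.reverse.foldl bstep ([], []) = (recs l, (chains l).reverse) := by
  induction l with
  | nil => simp [recs, chains]
  | cons x xs ih =>
    rw [List.reverse_cons, List.foldl_append, ih]
    simp only [List.foldl_cons, List.foldl_nil, bstep, recs, chains,
      ← fA_eq_dropWhile_recs]
    split_ifs <;> simp

theorem collector_alt_eq_chains (l : List Int) : collector_alt l = chains l := by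
  unfold collector_alt
  rw [bfold_eq]
  simp

theorem outer_fold (l : List Int) :
    ∀ (m : Nat) (j : Int) (acc : List (List Int)), 0 ≤ j → j + m = l.length →
      (PySem.List.pyRange j l.length 1).foldl (astep l) acc
        = acc ++ chains (l.drop j.toNat) := by
  intro m
  induction m with
  | zero =>
    intro j acc h0 hlen
    rw [PySem.List.pyRange_one_eq_nil (by omega)]
    have : j.toNat = l.length := by omega
    simp [this, chains]
  | succ m ih =>
    intro j acc h0 hlen
    have hjl : j < (l.length : Int) := by omega
    have hjn : j.toNat < l.length := by omega
    rw [PySem.List.pyRange_one_cons hjl, List.foldl_cons]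
    have hdrop : l.drop j.toNat = l[j.toNat] :: l.drop (j.toNat + 1) :=
      (List.getElem_cons_drop hjn).symm
    have hstep : astep l acc j
        = acc ++ (if (l[j.toNat] :: fA l[j.toNat] (l.drop (j.toNat + 1))).length > 1
            then [l[j.toNat] :: fA l[j.toNat] (l.drop (j.toNat + 1))] else []) := by
      unfold astep
      dsimp only
      rw [PySem.List.foldl_pyRange_pyGetD' l 0 ainner _ (by omega)]
      have h1 : (j + 1).toNat = j.toNat + 1 := by omega
      rw [h1, PySem.List.pyGetD_eq_getElem l 0 h0 hjl]
      rw [inner_fold_eq (l.drop (j.toNat + 1)) l[j.toNat] [l[j.toNat]]]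
      split_ifs <;> simp_all
    rw [hstep, ih (j + 1) _ (by omega) (by omega)]
    have h1 : (j + 1).toNat = j.toNat + 1 := by omega
    rw [h1, hdrop]
    show _ = acc ++ chains (l[j.toNat] :: l.drop (j.toNat + 1))
    simp [chains]

theorem collector_eq_chains (l : List Int) : collector l = chains l := by
  unfold collector
  rw [outer_fold l l.length 0 [] (by omega) (by omega)]
  simp

-- ===== VERDICT (by name: the statement is the Claim_ definition above) =====
theorem collector_spec : Claim_equal_collector := by
  intro l _
  unfold Spec_collector
  rw [collector_eq_chains, collector_alt_eq_chains]
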